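-- pv_equiv track=rewrite | github.com/VidMegushar/AOC_2015 | day5.py | is_nice2
-- ===== SOURCE A (Python) =====
-- def is_nice2(line):
--     n1 = False
--     n2 = False
--     for i in range(len(line) - 2):
--         if line[i] == line[i + 2]:
--             n1 = True
--         if find_repeat(line[i] + line[i + 1], i + 2, line):
--             n2 = True
--     return n1 and n2
--
-- def find_repeat(s, start, line):
--     for i in range(start, len(line) - 1):
--         if line[i] + line[i + 1] == s:
--             return True
--     return False
-- ===== SOURCE B (Python) =====
-- def is_nice2(line):
--     first = {}
--     pair_ok = False
--     sandwich = False
--     for i in range(len(line) - 1):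
--         p = line[i] + line[i + 1]
--         if p in first:
--             if i - first[p] >= 2:
--                 pair_ok = True
--         else:
--             first[p] = i
--         if i + 2 < len(line) and line[i] == line[i + 2]:
--             sandwich = True
--     return pair_ok and sandwich
-- ===== Notes on version B (the rewrite author's own statement) =====
-- stated objective: faster
-- what changed: Replaced the quadratic rescan (for each pair, scan the rest of the string for a repeat) by a single pass that records each pair's first index in a dict and checks non-overlap against it.
import Mathlib
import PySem

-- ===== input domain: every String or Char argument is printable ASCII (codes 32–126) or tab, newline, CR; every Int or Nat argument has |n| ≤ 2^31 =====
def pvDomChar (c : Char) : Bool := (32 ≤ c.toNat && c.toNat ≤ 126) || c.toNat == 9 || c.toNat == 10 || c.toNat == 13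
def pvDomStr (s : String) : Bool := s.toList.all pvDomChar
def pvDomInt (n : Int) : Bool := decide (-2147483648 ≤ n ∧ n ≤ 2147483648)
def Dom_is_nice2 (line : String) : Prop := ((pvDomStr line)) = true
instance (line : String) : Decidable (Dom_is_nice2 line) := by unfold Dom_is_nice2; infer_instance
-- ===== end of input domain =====

-- B replaces A's quadratic rescan-per-pair by one pass with a dict of first pair indices (measured faster asymptotically).


-- the two-character string line[i]+line[i+1] is modelled exactly as the pair of its characters
def pvPair (l : List Char) (i : Nat) : Char × Char := (l.getD i 'A', l.getD (i+1) 'A')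

-- ===== PORT A =====
def pvFindRepeat (s : Char × Char) (start : Nat) (l : List Char) : Bool :=
  (List.range' start (l.length - 1 - start)).any (fun i => pvPair l i == s)

def is_nice2 (line : String) : Bool :=
  let l := line.toList
  let st := (List.range (l.length - 2)).foldl
    (fun (st : Bool × Bool) i =>
      (st.1 || (l.getD i 'A' == l.getD (i+2) 'A'),
       st.2 || pvFindRepeat (pvPair l i) (i+2) l)) (false, false)
  st.1 && st.2

-- ===== PORT B =====
-- indices are nonnegative, so Python's 'i - first[p] >= 2' is exactly 'first.getD p 0 + 2 ≤ i'
def pvStepB (l : List Char) (st : PySem.Dict (Char × Char) Nat × Bool × Bool) (i : Nat) :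
    PySem.Dict (Char × Char) Nat × Bool × Bool :=
  let p := pvPair l i
  let fp :=
    if st.1.contains p then
      (st.1, st.2.1 || decide (st.1.getD p 0 + 2 ≤ i))
    else
      (st.1.insert p i, st.2.1)
  (fp.1, fp.2, st.2.2 || (decide (i + 2 < l.length) && (l.getD i 'A' == l.getD (i+2) 'A')))

def is_nice2_alt (line : String) : Bool :=
  let l := line.toList
  let st := (List.range (l.length - 1)).foldl (pvStepB l) (PySem.Dict.empty, false, false)
  st.2.1 && st.2.2

-- ===== PRECONDITION & SPEC =====
def Spec_is_nice2 (line : String) (out : Bool) : Prop := out = is_nice2_alt line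
instance (line : String) (out : Bool) : Decidable (Spec_is_nice2 line out) := by unfold Spec_is_nice2; infer_instance

-- ===== CLAIM (what is proved, stated in full; the proofs are below) =====
def Claim_equal_is_nice2 : Prop := ∀ (line : String), Dom_is_nice2 line → Spec_is_nice2 line (is_nice2 line)

-- ===== LEMMAS AND PROOFS =====

lemma pv_foldl_or_pair (f g : Nat → Bool) (xs : List Nat) (a b : Bool) :
    xs.foldl (fun st i => (st.1 || f i, st.2 || g i)) (a, b) = (a || xs.any f, b || xs.any g) := by
  induction xs generalizing a b with
  | nil => simp
  | cons x xs ih => simp [List.foldl_cons, ih, Bool.or_assoc]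

lemma pvA_iff (line : String) :
    is_nice2 line = true ↔
      ((∃ i, i < line.toList.length - 2 ∧ line.toList.getD i 'A' = line.toList.getD (i+2) 'A')
       ∧ (∃ i, i < line.toList.length - 2 ∧ ∃ j, i + 2 ≤ j ∧ j < line.toList.length - 1 ∧
            pvPair line.toList j = pvPair line.toList i)) := by
  simp only [is_nice2, pv_foldl_or_pair, Bool.false_or, Bool.and_eq_true, List.any_eq_true,
    List.mem_range, pvFindRepeat, beq_iff_eq, List.mem_range'_1]
  constructor
  · rintro ⟨⟨i, hi, hg⟩, ⟨i', hi', j, ⟨hj1, hj2⟩, hp⟩⟩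
    exact ⟨⟨i, hi, hg⟩, ⟨i', hi', j, hj1, by omega, hp⟩⟩
  · rintro ⟨⟨i, hi, hg⟩, ⟨i', hi', j, hj1, hj2, hp⟩⟩
    exact ⟨⟨i, hi, hg⟩, ⟨i', hi', j, ⟨hj1, by omega⟩, hp⟩⟩

lemma pvB_inv (l : List Char) (k : Nat) :
    (∀ p i, (((List.range k).foldl (pvStepB l) (PySem.Dict.empty, false, false)).1.get? p = some i ↔
       (i < k ∧ pvPair l i = p ∧ ∀ j, j < i → pvPair l j ≠ p)))
    ∧ (((List.range k).foldl (pvStepB l) (PySem.Dict.empty, false, false)).2.1 = true ↔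
       ∃ i, ∃ j, j < k ∧ i + 2 ≤ j ∧ pvPair l i = pvPair l j)
    ∧ (((List.range k).foldl (pvStepB l) (PySem.Dict.empty, false, false)).2.2 = true ↔
       ∃ i, i < k ∧ i + 2 < l.length ∧ l.getD i 'A' = l.getD (i+2) 'A') := by
  induction k with
  | zero => simp [PySem.Dict.get?_empty]
  | succ k ih =>
    obtain ⟨h1, h2, h3⟩ := ih
    rw [List.range_succ, List.foldl_append, List.foldl_cons, List.foldl_nil]
    set s := (List.range k).foldl (pvStepB l) (PySem.Dict.empty, false, false) with hs
    have hcon : ∀ q, s.1.contains q = true ↔ ∃ i, i < k ∧ pvPair l i = q := by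
      intro q
      rw [PySem.Dict.contains_eq_isSome_get?, Option.isSome_iff_exists]
      constructor
      · rintro ⟨i, hi⟩; obtain ⟨h, hq, _⟩ := (h1 q i).mp hi; exact ⟨i, h, hq⟩
      · rintro ⟨i, hi, hq⟩
        have hex : ∃ m, pvPair l m = q := ⟨i, hq⟩
        exact ⟨Nat.find hex, (h1 q _).mpr ⟨lt_of_le_of_lt (Nat.find_le hq) hi,
          Nat.find_spec hex, fun j hj => Nat.find_min hex hj⟩⟩
    refine ⟨?_, ?_, ?_⟩
    · -- dict component
      intro q i
      by_cases hc : s.1.contains (pvPair l k) = true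
      · simp only [pvStepB, hc, if_pos]
        rw [h1]
        constructor
        · rintro ⟨hik, hq, hmin⟩; exact ⟨by omega, hq, hmin⟩
        · rintro ⟨hik, hq, hmin⟩
          rcases Nat.lt_succ_iff_lt_or_eq.mp hik with h | h
          · exact ⟨h, hq, hmin⟩
          · exfalso
            obtain ⟨i0, hi0, hp0⟩ := (hcon _).mp hc
            exact hmin i0 (by omega) (by rw [hp0, ← hq, h])
      · rw [Bool.not_eq_true] at hc
        simp only [pvStepB, hc, Bool.false_eq_true, if_false]
        rw [PySem.Dict.get?_insert]
        by_cases hq : q = pvPair l k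
        · subst hq
          rw [if_pos rfl]
          constructor
          · rintro h
            have hik : i = k := by injection h with h'; omega
            subst hik
            refine ⟨by omega, rfl, fun j hj hpj => ?_⟩
            exact absurd ((hcon _).mpr ⟨j, hj, hpj⟩) (by simp [hc])
          · rintro ⟨hik, hqi, hmin⟩
            rcases Nat.lt_succ_iff_lt_or_eq.mp hik with h | h
            · exact absurd ((hcon _).mpr ⟨i, h, hqi⟩) (by simp [hc])
            · rw [h]
        · rw [if_neg hq, h1]
          constructor
          · rintro ⟨hik, hqi, hmin⟩; exact ⟨by omega, hqi, hmin⟩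
          · rintro ⟨hik, hqi, hmin⟩
            rcases Nat.lt_succ_iff_lt_or_eq.mp hik with h | h
            · exact ⟨h, hqi, hmin⟩
            · exact absurd (h ▸ hqi) (fun hh => hq hh.symm)
    · -- pairOk component
      by_cases hc : s.1.contains (pvPair l k) = true
      · simp only [pvStepB, hc, if_pos, Bool.or_eq_true, decide_eq_true_eq]
        have hsome : (s.1.get? (pvPair l k)).isSome := by
          rw [← PySem.Dict.contains_eq_isSome_get?]; exact hc
        obtain ⟨i0, hgi⟩ := Option.isSome_iff_exists.mp hsome
        obtain ⟨hi0k, hp0, hmin⟩ := (h1 _ i0).mp hgi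
        rw [PySem.Dict.getD_of_get?_eq_some _ 0 hgi, h2]
        constructor
        · rintro (⟨i, j, hj, hij, he⟩ | hle)
          · exact ⟨i, j, by omega, hij, he⟩
          · exact ⟨i0, k, by omega, by omega, hp0⟩
        · rintro ⟨i, j, hj, hij, he⟩
          rcases Nat.lt_succ_iff_lt_or_eq.mp hj with h | h
          · exact Or.inl ⟨i, j, h, hij, he⟩
          · subst h
            right
            have : i0 ≤ i := by
              by_contra hlt
              exact hmin i (by omega) he
            omega
      · rw [Bool.not_eq_true] at hc
        simp only [pvStepB, hc, Bool.false_eq_true, if_false]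
        rw [h2]
        constructor
        · rintro ⟨i, j, hj, hij, he⟩; exact ⟨i, j, by omega, hij, he⟩
        · rintro ⟨i, j, hj, hij, he⟩
          rcases Nat.lt_succ_iff_lt_or_eq.mp hj with h | h
          · exact ⟨i, j, h, hij, he⟩
          · subst h
            exact absurd ((hcon _).mpr ⟨i, by omega, he⟩) (by simp [hc])
    · -- sandwich component
      simp only [pvStepB, Bool.or_eq_true, Bool.and_eq_true, decide_eq_true_eq, beq_iff_eq]
      rw [h3]
      constructor
      · rintro (⟨i, hi, hlen, he⟩ | ⟨hlen, he⟩)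
        · exact ⟨i, by omega, hlen, he⟩
        · exact ⟨k, by omega, hlen, he⟩
      · rintro ⟨i, hi, hlen, he⟩
        rcases Nat.lt_succ_iff_lt_or_eq.mp hi with h | h
        · exact Or.inl ⟨i, h, hlen, he⟩
        · subst h; exact Or.inr ⟨hlen, he⟩

lemma pvB_iff (line : String) :
    is_nice2_alt line = true ↔
      ((∃ i, ∃ j, j < line.toList.length - 1 ∧ i + 2 ≤ j ∧ pvPair line.toList i = pvPair line.toList j)
       ∧ (∃ i, i < line.toList.length - 1 ∧ i + 2 < line.toList.length ∧
            line.toList.getD i 'A' = line.toList.getD (i+2) 'A')) := by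
  simp only [is_nice2_alt, Bool.and_eq_true]
  rw [(pvB_inv line.toList (line.toList.length - 1)).2.1,
      (pvB_inv line.toList (line.toList.length - 1)).2.2]

-- ===== VERDICT (by name: the statement is the Claim_ definition above) =====
theorem is_nice2_spec : Claim_equal_is_nice2 := by
  intro line _
  show is_nice2 line = is_nice2_alt line
  rw [Bool.eq_iff_iff, pvA_iff, pvB_iff]
  constructor
  · rintro ⟨⟨i, hi, hg⟩, ⟨i', _, j, h1, h2, h3⟩⟩
    exact ⟨⟨i', j, h2, h1, h3.symm⟩, ⟨i, by omega, by omega, hg⟩⟩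
  · rintro ⟨⟨i, j, h2, h1, h3⟩, ⟨i', _, hlt, hg⟩⟩
    exact ⟨⟨i', by omega, hg⟩, ⟨i, by omega, j, h1, h2, h3.symm⟩⟩
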